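-- pv_equiv track=rewrite | github.com/soykrom/Thesis-Project | inputObtainer.py | remove_useless_commands
-- ===== SOURCE A (Python) =====
-- def remove_useless_commands(actions, states):
--     start_index = 0
--     end_index = len(actions) - 1
--
--     while start_index < len(actions) and all(val == 0 for val in actions[start_index]):
--         start_index += 1
--
--     while end_index >= 0 and all(val == 0 for val in actions[end_index]):
--         end_index -= 1
--
--     return actions[start_index:end_index + 1], states[start_index:end_index + 1]
-- ===== SOURCE B (Python) =====
-- def remove_useless_commands(actions, states):
--     useful = [i for i, a in enumerate(actions) if any(v != 0 for v in a)]
--     if useful: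
--         start, end = useful[0], useful[-1]
--     else:
--         start, end = 0, -1
--     return actions[start:end + 1], states[start:end + 1]
-- ===== Notes on version B (the rewrite author's own statement) =====
-- stated objective: simpler
-- what changed: Replaces the two end-scanning while loops by one pass building the list of non-zero row indices, then slices between its first and last entry (0/-1 fallback when empty).
import Mathlib
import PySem

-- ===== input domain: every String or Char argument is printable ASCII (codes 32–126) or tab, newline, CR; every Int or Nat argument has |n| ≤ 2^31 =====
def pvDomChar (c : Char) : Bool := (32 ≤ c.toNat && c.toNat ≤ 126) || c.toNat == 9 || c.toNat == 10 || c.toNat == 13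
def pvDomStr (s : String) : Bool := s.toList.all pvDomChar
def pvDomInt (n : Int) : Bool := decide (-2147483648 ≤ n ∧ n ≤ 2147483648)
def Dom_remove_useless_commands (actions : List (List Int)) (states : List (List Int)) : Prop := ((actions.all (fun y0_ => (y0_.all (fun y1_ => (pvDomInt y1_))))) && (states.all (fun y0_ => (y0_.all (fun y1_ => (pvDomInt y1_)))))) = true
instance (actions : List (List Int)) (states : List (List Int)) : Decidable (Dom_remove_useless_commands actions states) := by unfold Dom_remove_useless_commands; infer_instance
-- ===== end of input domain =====

-- B replaces A's two end-scanning while loops by one pass collecting the non-zero row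
-- indices and slicing between its first and last entry (objective: simpler).

-- ===== PORT A =====
-- all(val == 0 for val in a)
def allZeroRow (a : List Int) : Bool := a.all (fun v => v == 0)

-- A's first while loop: number of leading rows passing allZeroRow (structural recursion over
-- the rows the loop inspects); A's second loop is the same scan from the end, i.e. this on the reverse.
def leadCount : List (List Int) → Nat
  | [] => 0
  | a :: rest => if allZeroRow a then leadCount rest + 1 else 0

def remove_useless_commands (actions : List (List Int)) (states : List (List Int)) : List (List Int) × List (List Int) :=
  let start_index : Int := leadCount actions
  let end_index : Int := (actions.length : Int) - 1 - leadCount actions.reverse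
  (PySem.List.slice actions (some start_index) (some (end_index + 1)),
   PySem.List.slice states (some start_index) (some (end_index + 1)))

-- ===== PORT B =====
-- [i for i, a in enumerate(xs, s) if any(v != 0 for v in a)]
def usefulIdxs (xs : List (List Int)) (s : Int) : List Int :=
  ((PySem.List.enumerate xs s).filter (fun p => p.2.any (fun v => v != 0))).map (fun p => p.1)

def remove_useless_commands_alt (actions : List (List Int)) (states : List (List Int)) : List (List Int) × List (List Int) :=
  match usefulIdxs actions 0 with
  | [] =>
      (PySem.List.slice actions (some 0) (some 0), PySem.List.slice states (some 0) (some 0))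
  | i :: rest =>
      let e := (i :: rest).getLast (List.cons_ne_nil i rest)
      (PySem.List.slice actions (some i) (some (e + 1)), PySem.List.slice states (some i) (some (e + 1)))

-- ===== PRECONDITION & SPEC =====
def Spec_remove_useless_commands (actions : List (List Int)) (states : List (List Int)) (out : List (List Int) × List (List Int)) : Prop := out = remove_useless_commands_alt actions states
instance (actions : List (List Int)) (states : List (List Int)) (out : List (List Int) × List (List Int)) : Decidable (Spec_remove_useless_commands actions states out) := by unfold Spec_remove_useless_commands; infer_instance

-- ===== CLAIM (what is proved, stated in full; the proofs are below) =====
def Claim_equal_remove_useless_commands : Prop := ∀ (actions : List (List Int)) (states : List (List Int)), Dom_remove_useless_commands actions states → Spec_remove_useless_commands actions states (remove_useless_commands actions states)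

-- ===== LEMMAS AND PROOFS =====

theorem allZeroRow_eq (a : List Int) : allZeroRow a = !(a.any (fun v => v != 0)) := by
  simp only [allZeroRow, List.all_eq_not_any_not, bne]

theorem usefulIdxs_cons_pos (a : List Int) (xs : List (List Int)) (s : Int)
    (ha : a.any (fun v => v != 0) = true) :
    usefulIdxs (a :: xs) s = s :: usefulIdxs xs (s + 1) := by
  simp [usefulIdxs, PySem.List.enumerate_cons, ha]

theorem usefulIdxs_cons_neg (a : List Int) (xs : List (List Int)) (s : Int)
    (ha : a.any (fun v => v != 0) = false) :
    usefulIdxs (a :: xs) s = usefulIdxs xs (s + 1) := by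
  simp only [usefulIdxs, PySem.List.enumerate_cons, List.filter_cons, ha, Bool.false_eq_true,
    if_false]

theorem usefulIdxs_append (xs ys : List (List Int)) (s : Int) :
    usefulIdxs (xs ++ ys) s = usefulIdxs xs s ++ usefulIdxs ys (s + xs.length) := by
  simp [usefulIdxs, PySem.List.enumerate_append]

theorem usefulIdxs_nil_iff (xs : List (List Int)) (s : Int) :
    usefulIdxs xs s = [] ↔ xs.all allZeroRow = true := by
  induction xs generalizing s with
  | nil => simp [usefulIdxs, PySem.List.enumerate_nil]
  | cons a rest ih =>
    cases ha : a.any (fun v => v != 0) with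
    | true =>
      rw [usefulIdxs_cons_pos a rest s ha]
      simp [allZeroRow_eq, ha]
    | false =>
      rw [usefulIdxs_cons_neg a rest s ha]
      simp [allZeroRow_eq, ha, ih]

theorem leadCount_all (xs : List (List Int)) (h : xs.all allZeroRow = true) :
    leadCount xs = xs.length := by
  induction xs with
  | nil => rfl
  | cons a rest ih =>
    simp only [List.all_cons, Bool.and_eq_true] at h
    simp [leadCount, h.1, ih h.2]

theorem usefulIdxs_head (xs : List (List Int)) (s i : Int) (rest : List Int)
    (h : usefulIdxs xs s = i :: rest) : i = s + leadCount xs := by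
  induction xs generalizing s i rest with
  | nil => simp [usefulIdxs, PySem.List.enumerate_nil] at h
  | cons a tl ih =>
    cases ha : a.any (fun v => v != 0) with
    | true =>
      rw [usefulIdxs_cons_pos a tl s ha] at h
      have haz : allZeroRow a = false := by rw [allZeroRow_eq, ha]; rfl
      injection h with h1 _
      simp only [leadCount, haz, Bool.false_eq_true, if_false, Nat.cast_zero, add_zero]
      omega
    | false =>
      rw [usefulIdxs_cons_neg a tl s ha] at h
      have haz : allZeroRow a = true := by rw [allZeroRow_eq, ha]; rfl
      have := ih (s + 1) i rest h
      simp only [leadCount, haz, if_true, this]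
      push_cast
      ring

theorem usefulIdxs_last (xs : List (List Int)) (s i : Int) (rest : List Int)
    (h : usefulIdxs xs s = i :: rest) :
    (i :: rest).getLast? = some (s + xs.length - 1 - leadCount xs.reverse) := by
  induction xs using List.reverseRecOn generalizing s i rest with
  | nil => simp [usefulIdxs, PySem.List.enumerate_nil] at h
  | append_singleton tl a ih =>
    rw [usefulIdxs_append] at h
    cases ha : a.any (fun v => v != 0) with
    | true =>
      have haz : allZeroRow a = false := by rw [allZeroRow_eq, ha]; rfl
      have hone : usefulIdxs [a] (s + tl.length) = [s + tl.length] :=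
        usefulIdxs_cons_pos a [] (s + tl.length) ha
      rw [hone] at h
      have hz : leadCount (tl ++ [a]).reverse = 0 := by
        simp [List.reverse_append, leadCount, haz]
      rw [← h, List.getLast?_concat, hz]
      congr 1
      simp only [List.length_append, List.length_cons, List.length_nil]
      push_cast
      ring
    | false =>
      have haz : allZeroRow a = true := by rw [allZeroRow_eq, ha]; rfl
      have hone : usefulIdxs [a] (s + tl.length) = [] :=
        usefulIdxs_cons_neg a [] (s + tl.length) ha
      rw [hone, List.append_nil] at h
      have hz : leadCount (tl ++ [a]).reverse = leadCount tl.reverse + 1 := by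
        simp [List.reverse_append, leadCount, haz]
      rw [ih s i rest h, hz]
      congr 1
      simp only [List.length_append, List.length_cons, List.length_nil]
      push_cast
      ring

theorem slice_to_zero (xs : List (List Int)) (a : Int) (ha : 0 ≤ a) :
    PySem.List.slice xs (some a) (some 0) = [] := by
  rw [PySem.List.slice_toNat xs ha le_rfl]
  simp

-- ===== VERDICT (by name: the statement is the Claim_ definition above) =====
theorem remove_useless_commands_spec : Claim_equal_remove_useless_commands := by
  intro actions states _
  show remove_useless_commands actions states = remove_useless_commands_alt actions states
  unfold remove_useless_commands remove_useless_commands_alt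
  cases h : usefulIdxs actions 0 with
  | nil =>
    have hall : actions.all allZeroRow = true := (usefulIdxs_nil_iff actions 0).mp h
    have hrall : actions.reverse.all allZeroRow = true := by simpa using hall
    have h1 : leadCount actions = actions.length := leadCount_all _ hall
    have h2 : leadCount actions.reverse = actions.length := by
      rw [leadCount_all _ hrall, List.length_reverse]
    have e1 : (actions.length : Int) - 1 - (leadCount actions.reverse : Int) + 1 = 0 := by
      rw [h2]; ring
    simp only [h1, e1]
    rw [slice_to_zero actions _ (by positivity), slice_to_zero states _ (by positivity),
      slice_to_zero actions 0 le_rfl, slice_to_zero states 0 le_rfl]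
  | cons i rest =>
    have hh : i = 0 + (leadCount actions : Int) := usefulIdxs_head actions 0 i rest h
    have hl' : (i :: rest).getLast? =
        some (0 + (actions.length : Int) - 1 - leadCount actions.reverse) :=
      usefulIdxs_last actions 0 i rest h
    have hl : (i :: rest).getLast (List.cons_ne_nil i rest)
        = 0 + (actions.length : Int) - 1 - leadCount actions.reverse := by
      have := List.getLast?_eq_some_getLast (l := i :: rest) (List.cons_ne_nil i rest)
      rw [this] at hl'
      exact Option.some.injEq _ _ ▸ hl'
    dsimp only
    rw [hl, hh]
    norm_num
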